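-- pv_equiv track=rewrite | github.com/cgug-aa/python_playground | string/sliding_string.py | solution
-- ===== SOURCE A (Python) =====
-- def solution(A, B):
--     AA=A+A
--     answer=0
--     for i in range(len(A), -1, -1):
--         if AA[i:i+len(A)]==B:
--             return answer
--         else:
--             answer+=1
--     return -1
-- ===== SOURCE B (Python) =====
-- def solution(A, B):
--     # Column-wise candidate filtering: keep the start positions in A+A still
--     # consistent with B after reading each character of B in turn; the answer
--     # is len(A) minus the largest surviving start position.
--     n = len(A)
--     if len(B) != n:
--         return -1
--     AA = A + A
--     cands = list(range(n + 1))
--     for t in range(n):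
--         c = B[t]
--         cands = [j for j in cands if AA[j + t] == c]
--     if not cands:
--         return -1
--     return n - max(cands)
-- ===== Notes on version B (the rewrite author's own statement) =====
-- stated objective: alternative
-- what changed: Replaces A's backward scan that compares each of the n+1 rotation slices wholesale with a column-wise candidate-filtering pass: B reads B's characters one at a time and keeps the set of start positions in A+A still consistent, then returns len(A) minus the largest survivor.
import Mathlib
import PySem

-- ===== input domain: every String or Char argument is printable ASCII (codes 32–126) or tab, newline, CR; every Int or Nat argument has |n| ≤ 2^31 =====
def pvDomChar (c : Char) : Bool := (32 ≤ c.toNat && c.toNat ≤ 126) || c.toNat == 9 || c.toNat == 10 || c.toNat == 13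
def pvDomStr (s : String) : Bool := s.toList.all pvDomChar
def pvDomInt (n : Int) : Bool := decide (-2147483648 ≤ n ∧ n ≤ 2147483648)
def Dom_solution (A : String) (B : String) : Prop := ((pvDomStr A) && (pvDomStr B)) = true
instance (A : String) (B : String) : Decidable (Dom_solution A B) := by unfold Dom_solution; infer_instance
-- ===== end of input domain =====

-- B replaces A's backward scan over whole rotation slices with a column-wise
-- candidate-filtering pass over B's characters (same worst-case cost, different algorithm).

-- ===== PORT A =====
-- the 'for i in range(len(A), -1, -1)' loop with its early return; 'answer' is the accumulator
def solutionLoop (AA B : List Char) (n : Int) : List Int → Int → Int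
  | [], _ => -1
  | i :: rest, answer =>
      if PySem.List.slice AA (some i) (some (i + n)) == B then answer
      else solutionLoop AA B n rest (answer + 1)

def solution (A : String) (B : String) : Int :=
  let AA := A.toList ++ A.toList          -- AA = A + A (string concat, ported on code points)
  solutionLoop AA B.toList (PySem.Str.len A) (PySem.List.pyRange (PySem.Str.len A) (-1) (-1)) 0

-- ===== PORT B =====
def solution_alt (A : String) (B : String) : Int :=
  let n := PySem.Str.len A
  if PySem.Str.len B ≠ n then -1
  else
    let AA := A.toList ++ A.toList
    -- for t in range(n): cands = [j for j in cands if AA[j+t] == B[t]]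
    let cands := (PySem.List.pyRange 0 n 1).foldl
      (fun cands t =>
        let c := PySem.List.pyGetD B.toList t ' '
        cands.filter (fun j => PySem.List.pyGetD AA (j + t) ' ' == c))
      (PySem.List.pyRange 0 (n + 1) 1)
    match PySem.List.max? cands (fun x => x) with
    | none => -1
    | some m => n - m

-- ===== PRECONDITION & SPEC =====
def Spec_solution (A : String) (B : String) (out : Int) : Prop := out = solution_alt A B
instance (A : String) (B : String) (out : Int) : Decidable (Spec_solution A B out) := by unfold Spec_solution; infer_instance

-- ===== CLAIM (what is proved, stated in full; the proofs are below) =====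
def Claim_equal_solution : Prop := ∀ (A : String) (B : String), Dom_solution A B → Spec_solution A B (solution A B)

-- ===== LEMMAS AND PROOFS =====

-- for |B| = n, the slice comparison AA[k:k+n] == B is exactly the prefix test at k
lemma slice_beq (AA B : List Char) (n k : Nat) (hB : B.length = n) :
    (PySem.List.slice AA (some (k : Int)) (some ((k : Int) + (n : Int))) == B) =
      B.isPrefixOf (AA.drop k) := by
  rw [PySem.List.slice_natCast_add]
  rcases hbp : B.isPrefixOf (AA.drop k) with _ | _
  · rw [beq_eq_false_iff_ne]
    intro he
    rw [← Bool.not_eq_true, List.isPrefixOf_iff_prefix] at hbp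
    exact hbp (he ▸ hB ▸ List.take_prefix _ _)
  · rw [List.isPrefixOf_iff_prefix, List.prefix_iff_eq_take] at hbp
    rw [beq_iff_eq, ← hB, ← hbp]

-- for |B| ≠ n and k ≤ n, |AA| = 2n, the slice has length n and can never equal B
lemma slice_beq_ne (AA B : List Char) (n k : Nat) (hB : B.length ≠ n) (hA : AA.length = 2 * n)
    (hk : k ≤ n) :
    (PySem.List.slice AA (some (k : Int)) (some ((k : Int) + (n : Int))) == B) = false := by
  rw [PySem.List.slice_natCast_add, beq_eq_false_iff_ne]
  intro he
  apply hB
  rw [← he]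
  simp [hA]
  omega

-- unequal lengths: every slice comparison fails, the loop falls through to -1
lemma loop_ne (AA B : List Char) (n : Nat) (hB : B.length ≠ n) (hA : AA.length = 2 * n) :
    ∀ j : Nat, j ≤ n → ∀ ans : Int,
      solutionLoop AA B (n : Int) (PySem.List.pyRange (j : Int) (-1) (-1)) ans = -1 := by
  intro j
  induction j with
  | zero =>
    intro _ ans
    rw [Nat.cast_zero, PySem.List.pyRange_neg_one_cons (by omega),
        PySem.List.pyRange_neg_one_eq_nil (by omega)]
    have hsl := slice_beq_ne AA B n 0 hB hA (by omega)
    push_cast at hsl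
    simp only [solutionLoop]
    rw [hsl]
    simp only [Bool.false_eq_true, if_false]
  | succ j ih =>
    intro hj ans
    rw [Nat.cast_succ, PySem.List.pyRange_neg_one_cons (by omega)]
    have hsl := slice_beq_ne AA B n (j+1) hB hA (by omega)
    push_cast at hsl
    simp only [solutionLoop]
    rw [hsl]
    simp only [Bool.false_eq_true, if_false]
    rw [show (j:Int) + 1 - 1 = (j:Int) by ring]
    exact ih (by omega) (ans + 1)

-- a running max is bounded by any common upper bound
lemma foldl_max_le (t : List Int) (a x : Int) (ha : a ≤ x) (h : ∀ y ∈ t, y ≤ x) :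
    t.foldl max a ≤ x := by
  induction t generalizing a with
  | nil => exact ha
  | cons b t ih =>
    exact ih _ (max_le ha (h b (List.mem_cons_self))) (fun y hy => h y (List.mem_cons_of_mem _ hy))

-- max(l ++ [x]) = x when x bounds l
lemma max?_append_last (l : List Int) (x : Int) (h : ∀ y ∈ l, y ≤ x) :
    PySem.List.max? (l ++ [x]) (fun y => y) = some x := by
  cases l with
  | nil => rw [List.nil_append, PySem.List.max?_id_cons]; simp
  | cons a t =>
    rw [List.cons_append, PySem.List.max?_id_cons, List.foldl_append]
    simp only [List.foldl_cons, List.foldl_nil]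
    congr 1
    exact max_eq_right (foldl_max_le t a x (h a (by simp))
      (fun y hy => h y (by simp [hy])))

-- a fold of successive filters is one filter by the conjunction of all the tests
lemma foldl_filter (ts : List Int) (p : Int → Int → Bool) (l : List Int) :
    ts.foldl (fun l t => l.filter (p t)) l = l.filter (fun j => ts.all (fun t => p t j)) := by
  induction ts generalizing l with
  | nil => simp
  | cons t ts ih =>
    rw [List.foldl_cons, ih, List.filter_filter]
    simp [Bool.and_comm]

-- the column tests at position k amount to the prefix test at k (k ≤ n, |B| = n, |AA| = 2n)
lemma all_cols_eq_prefix (AA B : List Char) (n k : Nat) (hB : B.length = n)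
    (hA : AA.length = 2 * n) (hk : k ≤ n) :
    ((List.range n).all (fun t => AA.getD (k + t) ' ' == B.getD t ' ')) =
      B.isPrefixOf (AA.drop k) := by
  rcases hbp : B.isPrefixOf (AA.drop k) with _ | _
  · rw [← Bool.not_eq_true, List.isPrefixOf_iff_prefix, List.prefix_iff_eq_take] at hbp
    rw [← Bool.not_eq_true, List.all_eq_true]
    intro hall
    apply hbp
    apply List.ext_getElem
    · simp [hA, hB]; omega
    · intro t ht1 ht2
      have htn : t < n := by omega
      have := hall t (by simpa using htn)
      rw [beq_iff_eq, List.getD_eq_getElem _ _ (by simp [hA]; omega),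
          List.getD_eq_getElem _ _ (by omega)] at this
      simp only [List.getElem_take, List.getElem_drop]
      exact this.symm
  · rw [List.isPrefixOf_iff_prefix] at hbp
    rw [List.all_eq_true]
    intro t ht
    rw [List.mem_range] at ht
    rw [beq_iff_eq, List.getD_eq_getElem _ _ (by simp [hA]; omega),
        List.getD_eq_getElem _ _ (by omega)]
    have := hbp.getElem (i := t) (by omega)
    rw [List.getElem_drop] at this
    exact this.symm

-- equal lengths: A's loop started at j (answer n-j) equals "n - (largest matching k ≤ j)" or -1
lemma loop_max (AA B : List Char) (n : Nat) (hB : B.length = n) :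
    ∀ j : Nat, j ≤ n →
      solutionLoop AA B (n : Int) (PySem.List.pyRange (j : Int) (-1) (-1)) ((n : Int) - (j : Int)) =
        (match PySem.List.max?
            (((PySem.List.pyRange 0 ((j : Int) + 1) 1)).filter
              (fun i => B.isPrefixOf (AA.drop i.toNat))) (fun x => x) with
         | none => -1
         | some m => (n : Int) - m) := by
  intro j
  induction j with
  | zero =>
    intro _
    rw [Nat.cast_zero, PySem.List.pyRange_neg_one_cons (by omega),
        PySem.List.pyRange_neg_one_eq_nil (by omega), PySem.List.pyRange_one_singleton]
    have hsl := slice_beq AA B n 0 hB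
    push_cast at hsl
    simp only [solutionLoop]
    rw [hsl, List.drop_zero]
    rcases hp : B.isPrefixOf AA with _ | _
    · simp [List.filter, hp, PySem.List.max?]
    · simp [List.filter, hp, PySem.List.max?]
  | succ j ih =>
    intro hj
    rw [Nat.cast_succ, PySem.List.pyRange_neg_one_cons (by omega)]
    have hsl := slice_beq AA B n (j+1) hB
    push_cast at hsl
    simp only [solutionLoop]
    rw [hsl]
    have hsplit : PySem.List.pyRange 0 ((j:Int) + 1 + 1) 1 =
        PySem.List.pyRange 0 ((j:Int) + 1) 1 ++ [(j:Int) + 1] :=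
      PySem.List.pyRange_one_succ_right (by omega)
    rcases hp : B.isPrefixOf (AA.drop (j+1)) with _ | _
    · simp only [Bool.false_eq_true, if_false]
      rw [show (n:Int) - ((j:Int)+1) + 1 = (n:Int) - (j:Int) by ring,
          show (j:Int) + 1 - 1 = (j:Int) by ring]
      rw [ih (by omega), hsplit, List.filter_append]
      have : List.filter (fun i => B.isPrefixOf (AA.drop i.toNat)) [(j:Int) + 1] = [] := by
        simp only [List.filter]
        rw [show ((j:Int) + 1).toNat = j + 1 by omega, hp]
      rw [this, List.append_nil]
    · simp only [if_true]
      rw [hsplit, List.filter_append]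
      have hone : List.filter (fun i => B.isPrefixOf (AA.drop i.toNat)) [(j:Int) + 1] = [(j:Int)+1] := by
        simp only [List.filter]
        rw [show ((j:Int) + 1).toNat = j + 1 by omega, hp]
      rw [hone, max?_append_last]
      intro y hy
      have := List.mem_of_mem_filter hy
      rw [PySem.List.mem_pyRange_one] at this
      omega

-- ===== VERDICT (by name: the statement is the Claim_ definition above) =====
theorem solution_spec : Claim_equal_solution := by
  intro A B _
  unfold Spec_solution
  have hlen : PySem.Str.len A = (A.toList.length : Int) := by simp [pysem]
  have hlenB : PySem.Str.len B = (B.toList.length : Int) := by simp [pysem]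
  set n := A.toList.length with hn
  have hAA : (A.toList ++ A.toList).length = 2 * n := by simp [hn]; ring
  have hA' : solution A B = solutionLoop (A.toList ++ A.toList) B.toList (PySem.Str.len A)
      (PySem.List.pyRange (PySem.Str.len A) (-1) (-1)) 0 := rfl
  have hB' : solution_alt A B = (if PySem.Str.len B ≠ PySem.Str.len A then -1 else
      match PySem.List.max? ((PySem.List.pyRange 0 (PySem.Str.len A) 1).foldl
        (fun cands t => cands.filter
          (fun j => PySem.List.pyGetD (A.toList ++ A.toList) (j + t) ' ' ==
            PySem.List.pyGetD B.toList t ' '))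
        (PySem.List.pyRange 0 (PySem.Str.len A + 1) 1)) (fun x => x) with
      | none => -1
      | some m => PySem.Str.len A - m) := rfl
  rw [hA', hB', hlen, hlenB]
  by_cases h : B.toList.length = n
  · rw [if_neg (by omega)]
    -- rewrite B's fold of filters into one filter by the prefix test
    rw [foldl_filter (PySem.List.pyRange 0 (n:Int) 1)
      (fun t j => PySem.List.pyGetD (A.toList ++ A.toList) (j + t) ' ' ==
        PySem.List.pyGetD B.toList t ' ')]
    have hfc : List.filter
        (fun j => (PySem.List.pyRange 0 (n:Int) 1).all
          (fun t => PySem.List.pyGetD (A.toList ++ A.toList) (j + t) ' ' ==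
            PySem.List.pyGetD B.toList t ' '))
        (PySem.List.pyRange 0 ((n:Int) + 1) 1) =
        List.filter (fun i => B.toList.isPrefixOf ((A.toList ++ A.toList).drop i.toNat))
        (PySem.List.pyRange 0 ((n:Int) + 1) 1) := by
      apply List.filter_congr
      intro j hj
      rw [PySem.List.mem_pyRange_one] at hj
      obtain ⟨k, rfl⟩ : ∃ k : Nat, j = (k : Int) := ⟨j.toNat, by omega⟩
      have hk : k ≤ n := by omega
      rw [PySem.List.pyRange_zero_nat, List.all_map]
      have hco : ∀ t : Nat,
          (PySem.List.pyGetD (A.toList ++ A.toList) ((k:Int) + (t:Int)) ' ' ==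
            PySem.List.pyGetD B.toList (t:Int) ' ') =
          ((A.toList ++ A.toList).getD (k + t) ' ' == B.toList.getD t ' ') := by
        intro t
        rw [show (k:Int) + (t:Int) = ((k + t : Nat) : Int) by push_cast; ring,
            PySem.List.pyGetD_natCast, PySem.List.pyGetD_natCast]
      simp only [Function.comp_def, hco]
      rw [all_cols_eq_prefix (A.toList ++ A.toList) B.toList n k h hAA hk]
      simp
    rw [hfc]
    have hl := loop_max (A.toList ++ A.toList) B.toList n h n (le_refl _)
    rw [show ((n:Int) - (n:Int)) = 0 by ring] at hl
    rw [hl]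
  · rw [if_pos (by omega)]
    exact loop_ne (A.toList ++ A.toList) B.toList n h hAA n (le_refl _) 0
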